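-- pv_equiv track=rewrite | github.com/chohan3036/algo_study | 2020FW_LINE/1.py | solution
-- ===== SOURCE A (Python) =====
-- from collections import Counter
--
-- def solution(boxes):
--     box_cnt = len(boxes)
--
--     # 상자를 풀어서 상품을 하나씩 담기
--     unpacked_boxes = []
--     for box in boxes:
--         unpacked_boxes.append(box[0])
--         unpacked_boxes.append(box[1])
--
--     # 각 상품의 개수를 카운터를 사용해 저장
--     goods_cnt = Counter(unpacked_boxes)
--
--     # 그 결과를 순회하며, 상품 개수가 짝수이면 box 에 짝지어 포장, box 개수 소모
--     # 그럴 수 없을 경우는 box 소모하지 않음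
--     for goods in goods_cnt.items():
--         if goods[1] % 2 == 0:
--             box_cnt -= goods[1] // 2
--
--     return box_cnt
-- ===== SOURCE B (Python) =====
-- def solution(boxes):
--     # sort the flattened goods and scan maximal runs of equal values
--     goods = sorted(g for box in boxes for g in box[:2])
--     box_cnt = len(boxes)
--     run = 0
--     prev = None
--     for g in goods:
--         if run > 0 and g == prev:
--             run += 1
--         else:
--             if run % 2 == 0:
--                 box_cnt -= run // 2
--             run = 1
--             prev = g
--     if run % 2 == 0:
--         box_cnt -= run // 2
--     return box_cnt
-- ===== Notes on version B (the rewrite author's own statement) =====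
-- stated objective: alternative
-- what changed: Replaces the Counter hash-tally and items-iteration by flattening the goods, sorting them, and scanning maximal runs of equal values in one pass, subtracting run//2 boxes when a run's length is even.
import Mathlib
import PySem

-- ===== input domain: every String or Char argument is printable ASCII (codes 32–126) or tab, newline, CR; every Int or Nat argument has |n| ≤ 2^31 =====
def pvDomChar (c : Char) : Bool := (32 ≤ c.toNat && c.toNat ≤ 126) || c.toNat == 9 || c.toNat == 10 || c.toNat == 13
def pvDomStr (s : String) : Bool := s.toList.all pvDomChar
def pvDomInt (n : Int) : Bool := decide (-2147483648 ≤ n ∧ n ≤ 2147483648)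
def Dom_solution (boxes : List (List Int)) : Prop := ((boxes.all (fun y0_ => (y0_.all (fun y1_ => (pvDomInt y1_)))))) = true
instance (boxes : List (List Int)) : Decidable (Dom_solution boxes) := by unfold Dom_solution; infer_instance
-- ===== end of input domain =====

-- B replaces A's Counter hash-tally by flatten-sort-then-scan-runs (a different data
-- representation and traversal, same result on every input Pre_ admits).


-- ===== PORT A =====
-- box[0] / box[1]: Pre_solution guarantees both indices are in range, so .getD 0 is never reached
def solution (boxes : List (List Int)) : Int :=
  let box_cnt : Int := boxes.length
  let unpacked : List Int :=
    boxes.foldl (fun acc box =>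
      (acc ++ [(PySem.List.pyGet? box 0).getD 0]) ++ [(PySem.List.pyGet? box 1).getD 0]) []
  let goods_cnt := PySem.Dict.counter unpacked
  goods_cnt.items.foldl
    (fun bc g => if PySem.Int.mod g.2 2 = 0 then bc - PySem.Int.floordiv g.2 2 else bc)
    box_cnt

-- ===== PORT B =====
-- close a finished run: if its length is even, pair up, consuming run//2 boxes
def closeRun (cnt run : Int) : Int :=
  if PySem.Int.mod run 2 = 0 then cnt - PySem.Int.floordiv run 2 else cnt

-- one loop iteration of Source B's scan (state = (box_cnt, run, prev))
def runStep (st : Int × Int × Option Int) (g : Int) : Int × Int × Option Int :=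
  if 0 < st.2.1 ∧ st.2.2 = some g then (st.1, st.2.1 + 1, st.2.2)
  else (closeRun st.1 st.2.1, 1, some g)

def solution_alt (boxes : List (List Int)) : Int :=
  let goods := PySem.List.sorted
    (boxes.flatMap (fun box => PySem.List.slice box none (some 2))) (fun x => x) false
  let st := goods.foldl runStep ((boxes.length : Int), 0, none)
  closeRun st.1 st.2.1

-- ===== PRECONDITION & SPEC =====
-- Pre_ excludes exactly the inputs where A raises IndexError (a box with fewer than two items)
def Pre_solution (boxes : List (List Int)) : Prop := ∀ box ∈ boxes, 2 ≤ box.length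
instance (boxes : List (List Int)) : Decidable (Pre_solution boxes) := by unfold Pre_solution; infer_instance
def pvWitness_solution : List (List Int) := [[1, 2], [2, 3]]

def Spec_solution (boxes : List (List Int)) (out : Int) : Prop := out = solution_alt boxes
instance (boxes : List (List Int)) (out : Int) : Decidable (Spec_solution boxes out) := by unfold Spec_solution; infer_instance

-- ===== CLAIM (what is proved, stated in full; the proofs are below) =====
def Claim_equal_solution : Prop := ∀ (boxes : List (List Int)), Dom_solution boxes → Pre_solution boxes → Spec_solution boxes (solution boxes)

-- ===== LEMMAS AND PROOFS =====

-- boxes contribute their first two goods each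
def unp (boxes : List (List Int)) : List Int :=
  boxes.flatMap (fun box => PySem.List.slice box none (some 2))

-- boxes consumed by a good appearing n times
def ptermZ (n : Int) : Int :=
  if PySem.Int.mod n 2 = 0 then PySem.Int.floordiv n 2 else 0

-- total boxes consumed over the distinct goods of l
def S (l : List Int) : Int := ∑ k ∈ l.toFinset, ptermZ (l.count k)

-- final state projection of Source B's scan
def closeRun2 (st : Int × Int × Option Int) : Int := closeRun st.1 st.2.1

lemma closeRun_eq (cnt run : Int) : closeRun cnt run = cnt - ptermZ run := by
  unfold closeRun ptermZ; split_ifs <;> simp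

lemma ptermZ_zero : ptermZ 0 = 0 := by decide

lemma S_nil : S ([] : List Int) = 0 := by simp [S]

lemma S_perm {l l' : List Int} (h : l.Perm l') : S l = S l' := by
  unfold S
  have hset : l.toFinset = l'.toFinset := by
    ext k; simp [List.Perm.mem_iff h]
  rw [hset]
  exact Finset.sum_congr rfl (fun k _ => by rw [List.Perm.count_eq h])

lemma S_decomp (l : List Int) (x : Int) (hx : x ∈ l) :
    S l = ptermZ (l.count x) + S (l.filter (· ≠ x)) := by
  unfold S
  have hset : l.toFinset = insert x (l.filter (· ≠ x)).toFinset := by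
    ext k
    simp only [List.mem_toFinset, Finset.mem_insert, List.mem_filter, decide_eq_true_eq]
    constructor
    · intro hk
      by_cases hkx : k = x
      · exact Or.inl hkx
      · exact Or.inr ⟨hk, hkx⟩
    · rintro (rfl | ⟨hk, -⟩)
      · exact hx
      · exact hk
  have hx' : x ∉ (l.filter (· ≠ x)).toFinset := by simp
  rw [hset, Finset.sum_insert hx']
  have hcx : (l.filter (· ≠ x)).count x = 0 := by
    simp [List.count_eq_zero, List.mem_filter]
  congr 1
  refine Finset.sum_congr rfl (fun k hk => ?_)
  have hkx : k ≠ x := by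
    simp only [List.mem_toFinset, List.mem_filter, decide_eq_true_eq] at hk
    exact hk.2
  rw [List.count_filter (by simpa using hkx)]

lemma unpacked_eq (boxes : List (List Int)) (acc : List Int) :
    boxes.foldl (fun acc box =>
      (acc ++ [(PySem.List.pyGet? box 0).getD 0]) ++ [(PySem.List.pyGet? box 1).getD 0]) acc
    = acc ++ boxes.flatMap
        (fun box => [(PySem.List.pyGet? box 0).getD 0, (PySem.List.pyGet? box 1).getD 0]) := by
  induction boxes generalizing acc with
  | nil => simp
  | cons b bs ih => simp only [List.foldl_cons, List.flatMap_cons, ih]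
                    simp [List.append_assoc]

lemma pair_eq_slice (box : List Int) (h : 2 ≤ box.length) :
    [(PySem.List.pyGet? box 0).getD 0, (PySem.List.pyGet? box 1).getD 0]
    = PySem.List.slice box none (some 2) := by
  match box, h with
  | a :: b :: t, _ =>
    have h2 : PySem.List.slice (a :: b :: t) none (some 2) = (a :: b :: t).take 2 := by
      have := PySem.List.slice_to_natCast (a :: b :: t) 2
      simpa using this
    have h1 : (0:Int) ≤ (t.length : Int) + 1 := by positivity
    have h0 : (0:Int) ≤ (t.length : Int) := by positivity
    rw [h2]
    simp [PySem.List.pyGet?, PySem.List.pyIdx?, h1, h0]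

lemma foldl_sub_ite {α : Type} (f : α → Int) (xs : List α) (init : Int) :
    xs.foldl (fun bc a => if PySem.Int.mod (f a) 2 = 0 then bc - PySem.Int.floordiv (f a) 2 else bc) init
    = init - (xs.map (fun a => ptermZ (f a))).sum := by
  induction xs generalizing init with
  | nil => simp
  | cons c cs ih => simp only [List.foldl_cons, ih, List.map_cons, List.sum_cons, ptermZ]
                    split_ifs <;> ring

lemma list_sum_toFinset (l : List Int) (f : Int → Int) :
    ((PySem.Set.ofList l).map f).sum = ∑ k ∈ l.toFinset, f k := by
  have hnd : (PySem.Set.ofList l).Nodup := PySem.Set.nodup_ofList l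
  have hset : (PySem.Set.ofList l).toFinset = l.toFinset := by
    ext k; simp [PySem.Set.mem_ofList]
  rw [← hset, List.sum_toFinset f hnd]

lemma solution_eq (boxes : List (List Int)) (h : Pre_solution boxes) :
    solution boxes = (boxes.length : Int) - S (unp boxes) := by
  have hflat : boxes.flatMap
      (fun box => [(PySem.List.pyGet? box 0).getD 0, (PySem.List.pyGet? box 1).getD 0])
      = unp boxes := by
    unfold unp
    induction boxes with
    | nil => simp
    | cons b bs ih =>
      have hb : 2 ≤ b.length := h b (List.mem_cons_self)
      have hbs : ∀ box ∈ bs, 2 ≤ box.length := fun box hbox => h box (List.mem_cons_of_mem b hbox)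
      simp only [List.flatMap_cons, ih hbs, pair_eq_slice b hb]
  simp only [solution, unpacked_eq boxes [], List.nil_append, hflat]
  rw [PySem.Dict.items_counter]
  rw [List.foldl_map]
  rw [foldl_sub_ite (fun k => ((unp boxes).count k : Int)) (PySem.Set.ofList (unp boxes))]
  rw [list_sum_toFinset]
  rfl

lemma L1 (s : List Int) : s.Pairwise (· ≤ ·) →
    ∀ (g cnt run : Int), (∀ x ∈ s, g ≤ x) → 1 ≤ run →
    closeRun2 (s.foldl runStep (cnt, run, some g))
    = cnt - ptermZ (run + s.count g) - S (s.filter (· ≠ g)) := by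
  induction s with
  | nil => intro _ g cnt run _ _
           simp [closeRun2, closeRun_eq, S_nil]
  | cons x s ih =>
    intro hp g cnt run hge hrun
    have hxle : g ≤ x := hge x (List.mem_cons_self)
    have hpx : ∀ y ∈ s, x ≤ y := (List.pairwise_cons.mp hp).1
    have hps : s.Pairwise (· ≤ ·) := (List.pairwise_cons.mp hp).2
    by_cases hxg : x = g
    · subst hxg
      rw [List.foldl_cons,
          show runStep (cnt, run, some x) x = (cnt, run + 1, some x) from by
            simp [runStep]; omega,
          ih hps x cnt (run + 1) hpx (by omega)]
      rw [List.count_cons_self]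
      have : run + (↑(s.count x) + 1) = run + 1 + ↑(s.count x) := by ring
      rw [show ((x :: s).filter (· ≠ x)) = s.filter (· ≠ x) from by simp]
      push_cast
      ring_nf
    · have hgx : g < x := lt_of_le_of_ne hxle (fun hh => hxg hh.symm)
      have hgns : g ∉ s := fun hmem => absurd (hpx g hmem) (by omega)
      have hcg : s.count g = 0 := List.count_eq_zero.mpr hgns
      rw [List.foldl_cons,
          show runStep (cnt, run, some g) x = (closeRun cnt run, 1, some x) from by
            have hgx'' : ¬ g = x := fun hh => hxg hh.symm
            simp [runStep, hgx''],
          ih hps x (closeRun cnt run) 1 hpx le_rfl, closeRun_eq]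
      have hfilter : (x :: s).filter (· ≠ g) = x :: s :=
        List.filter_eq_self.mpr (fun y hy => by
          rcases List.mem_cons.mp hy with rfl | hy'
          · simpa using hxg
          · have := hpx y hy'
            simp only [decide_eq_true_eq]
            omega)
      have hcount : List.count g (x :: s) = 0 := List.count_eq_zero.mpr (by
        intro hmem
        rcases List.mem_cons.mp hmem with hh | hm
        · exact hxg hh.symm
        · exact hgns hm)
      rw [hcount, hfilter,
          S_decomp (x :: s) x (List.mem_cons_self), List.count_cons_self,
          show ((x :: s).filter (· ≠ x)) = s.filter (· ≠ x) from by simp]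
      push_cast
      ring_nf

lemma sorted_scan (s : List Int) (hp : s.Pairwise (· ≤ ·)) (cnt : Int) :
    closeRun2 (s.foldl runStep (cnt, 0, none)) = cnt - S s := by
  cases s with
  | nil => simp [closeRun2, closeRun_eq, ptermZ_zero, S_nil]
  | cons g rest =>
    have hpx : ∀ y ∈ rest, g ≤ y := (List.pairwise_cons.mp hp).1
    have hps : rest.Pairwise (· ≤ ·) := (List.pairwise_cons.mp hp).2
    rw [List.foldl_cons,
        show runStep (cnt, 0, none) g = (closeRun cnt 0, 1, some g) from by simp [runStep],
        closeRun_eq, ptermZ_zero,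
        L1 rest hps g (cnt - 0) 1 hpx le_rfl,
        S_decomp (g :: rest) g (List.mem_cons_self), List.count_cons_self,
        show ((g :: rest).filter (· ≠ g)) = rest.filter (· ≠ g) from by simp]
    push_cast
    ring_nf

lemma solution_alt_eq (boxes : List (List Int)) :
    solution_alt boxes = (boxes.length : Int) - S (unp boxes) := by
  have hperm : (PySem.List.sorted (unp boxes) (fun x => x) false).Perm (unp boxes) :=
    PySem.List.sorted_perm (unp boxes) (fun x => x) false
  have hpair : (PySem.List.sorted (unp boxes) (fun x => x) false).Pairwise (· ≤ ·) := by
    have := PySem.List.sorted_pairwise (unp boxes) (fun x => x)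
    simpa using this
  have := sorted_scan _ hpair (boxes.length : Int)
  simp only [solution_alt, closeRun2] at this ⊢
  rw [show boxes.flatMap (fun box => PySem.List.slice box none (some 2)) = unp boxes from rfl]
  rw [this, S_perm hperm]

-- ===== VERDICT (by name: the statement is the Claim_ definition above) =====
theorem solution_spec : Claim_equal_solution :=
  fun boxes _ hpre => (solution_eq boxes hpre).trans (solution_alt_eq boxes).symm
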